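-- pv_equiv track=rewrite | github.com/aliyun/alibabacloud-odps-maxframe-client | core/maxframe/dataframe/datasource/read_odps_query.py | _split_explain_string
-- ===== SOURCE A (Python) =====
-- from typing import Dict, List, MutableMapping, Optional, Tuple, Union
--
-- def _split_explain_string(explain_string: str) -> List[str]:
--     parts = explain_string.split("\n\n")
--     final_parts = []
--     grouped = []
--     for part in parts:
--         part = part.strip("\n")
--         part_line1 = part.split("\n", 1)[0]
--         # initial line of part should not start with spaces (Statistics row)
--         #  or with quote marks
--         if (
--             grouped
--             and not part.startswith(" ")
--             and "'" not in part_line1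
--             and '"' not in part_line1
--         ):
--             final_parts.append("\n\n".join(grouped).strip())
--             grouped = []
--         grouped.append(part)
--     if grouped:
--         final_parts.append("\n\n".join(grouped).strip())
--     return final_parts
-- ===== SOURCE B (Python) =====
-- from typing import List
--
--
-- def _is_header(part: str) -> bool:
--     line1 = part.split("\n", 1)[0]
--     return (
--         not part.startswith(" ") and "'" not in line1 and '"' not in line1
--     )
--
--
-- def _split_explain_string(explain_string: str) -> List[str]:
--     # Span decomposition: strip all parts up front, then repeatedly take one
--     # part plus the following run of non-header parts as one group.
--     parts = [p.strip("\n") for p in explain_string.split("\n\n")]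
--     groups = []
--     i = 0
--     n = len(parts)
--     while i < n:
--         k = i + 1
--         while k < n and not _is_header(parts[k]):
--             k += 1
--         groups.append("\n\n".join(parts[i:k]).strip())
--         i = k
--     return groups
-- ===== Notes on version B (the rewrite author's own statement) =====
-- stated objective: alternative
-- what changed: Replaces A's single accumulator loop with a flush buffer by a two-stage decomposition: strip all parts up front, then recursively split the list into groups by spanning each leading part together with the following run of non-header parts.
import Mathlib
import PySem

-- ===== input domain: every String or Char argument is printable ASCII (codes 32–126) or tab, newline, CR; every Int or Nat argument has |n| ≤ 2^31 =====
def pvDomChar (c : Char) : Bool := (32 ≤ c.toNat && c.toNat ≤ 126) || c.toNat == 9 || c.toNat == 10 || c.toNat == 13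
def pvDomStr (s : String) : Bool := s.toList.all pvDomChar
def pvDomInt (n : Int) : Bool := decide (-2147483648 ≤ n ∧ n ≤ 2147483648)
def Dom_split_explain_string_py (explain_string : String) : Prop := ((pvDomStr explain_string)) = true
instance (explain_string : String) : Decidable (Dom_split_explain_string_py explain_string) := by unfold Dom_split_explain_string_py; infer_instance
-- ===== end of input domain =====

-- B replaces A's flush-buffer accumulator loop by strip-all-parts-first plus a
-- recursive span split into groups (same cost; objective: alternative decomposition).

-- ===== PORT A =====
def split_explain_string_py (explain_string : String) : List String :=
  let parts := (PySem.Str.split? explain_string "\n\n").getD []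
  let res := parts.foldl (fun (acc : List String × List String) part0 =>
      let part := PySem.Str.stripChars part0 "\n"
      let part_line1 := ((PySem.Str.splitMax? part "\n" 1).getD []).headD ""
      let acc' :=
        if !acc.2.isEmpty && !PySem.Str.startswith part " " &&
           !PySem.Str.isIn "'" part_line1 && !PySem.Str.isIn "\"" part_line1 then
          (acc.1 ++ [PySem.Str.strip (PySem.Str.join "\n\n" acc.2)], ([] : List String))
        else acc
      (acc'.1, acc'.2 ++ [part])) ([], [])
  if !res.2.isEmpty then res.1 ++ [PySem.Str.strip (PySem.Str.join "\n\n" res.2)] else res.1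

-- ===== PORT B =====
def pvIsHeader (part : String) : Bool :=
  let line1 := ((PySem.Str.splitMax? part "\n" 1).getD []).headD ""
  !PySem.Str.startswith part " " && !PySem.Str.isIn "'" line1 && !PySem.Str.isIn "\"" line1

-- the inner `while` of B's `chunks` scans the run of non-header parts: takeWhile/dropWhile
def pvChunks : List String → List String
  | [] => []
  | p :: rest =>
    PySem.Str.strip (PySem.Str.join "\n\n" (p :: rest.takeWhile (fun q => !pvIsHeader q)))
      :: pvChunks (rest.dropWhile (fun q => !pvIsHeader q))
termination_by ps => ps.length
decreasing_by
  have := List.length_dropWhile_le (p := fun q => !pvIsHeader q) (l := rest)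
  simp only [List.length_cons]
  omega

def split_explain_string_py_alt (explain_string : String) : List String :=
  pvChunks (((PySem.Str.split? explain_string "\n\n").getD []).map
    (fun p => PySem.Str.stripChars p "\n"))

-- ===== PRECONDITION & SPEC =====
def Spec_split_explain_string_py (explain_string : String) (out : List String) : Prop := out = split_explain_string_py_alt explain_string
instance (explain_string : String) (out : List String) : Decidable (Spec_split_explain_string_py explain_string out) := by unfold Spec_split_explain_string_py; infer_instance

-- ===== CLAIM (what is proved, stated in full; the proofs are below) =====
def Claim_equal_split_explain_string_py : Prop := ∀ (explain_string : String), Dom_split_explain_string_py explain_string → Spec_split_explain_string_py explain_string (split_explain_string_py explain_string)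

-- ===== LEMMAS AND PROOFS =====
def pvEmit (g : List String) : String := PySem.Str.strip (PySem.Str.join "\n\n" g)

-- A's loop body, on an already-stripped part
def pvStepA (acc : List String × List String) (part : String) : List String × List String :=
  let part_line1 := ((PySem.Str.splitMax? part "\n" 1).getD []).headD ""
  let acc' :=
    if !acc.2.isEmpty && !PySem.Str.startswith part " " &&
       !PySem.Str.isIn "'" part_line1 && !PySem.Str.isIn "\"" part_line1 then
      (acc.1 ++ [PySem.Str.strip (PySem.Str.join "\n\n" acc.2)], ([] : List String))
    else acc
  (acc'.1, acc'.2 ++ [part])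

def pvFinishA (res : List String × List String) : List String :=
  if !res.2.isEmpty then res.1 ++ [pvEmit res.2] else res.1

def pvChunksAux : List String → List String → List String
  | g, [] => [pvEmit g]
  | g, p :: rest => if pvIsHeader p then pvEmit g :: pvChunksAux [p] rest
                    else pvChunksAux (g ++ [p]) rest

lemma pvStepA_eq (acc : List String × List String) (part : String) :
    pvStepA acc part =
      if !acc.2.isEmpty && pvIsHeader part then (acc.1 ++ [pvEmit acc.2], [part])
      else (acc.1, acc.2 ++ [part]) := by
  simp only [pvStepA, pvIsHeader, pvEmit, ← Bool.and_assoc]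
  cases acc.2.isEmpty <;>
    cases PySem.Str.startswith part " " <;>
      cases PySem.Str.isIn "'" (((PySem.Str.splitMax? part "\n" 1).getD []).headD "") <;>
        cases PySem.Str.isIn "\"" (((PySem.Str.splitMax? part "\n" 1).getD []).headD "") <;>
          simp

lemma pvStepA_pos (acc : List String × List String) (part : String)
    (h2 : acc.2.isEmpty = false) (hh : pvIsHeader part = true) :
    pvStepA acc part = (acc.1 ++ [pvEmit acc.2], [part]) := by
  simp [pvStepA_eq, h2, hh]

lemma pvStepA_neg_empty (acc : List String × List String) (part : String)
    (h2 : acc.2.isEmpty = true) :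
    pvStepA acc part = (acc.1, acc.2 ++ [part]) := by
  simp [pvStepA_eq, h2]

lemma pvStepA_neg_hdr (acc : List String × List String) (part : String)
    (hh : pvIsHeader part = false) :
    pvStepA acc part = (acc.1, acc.2 ++ [part]) := by
  simp [pvStepA_eq, hh]

lemma pvLoopA (rest : List String) : ∀ (fin g : List String), g ≠ [] →
    pvFinishA (rest.foldl pvStepA (fin, g)) = fin ++ pvChunksAux g rest := by
  induction rest with
  | nil =>
    intro fin g hg
    simp [pvFinishA, pvChunksAux, hg]
  | cons p rest ih =>
    intro fin g hg
    have h2 : g.isEmpty = false := by simpa using hg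
    rw [List.foldl_cons]
    by_cases hh : pvIsHeader p
    · rw [pvStepA_pos _ _ h2 hh, ih (fin ++ [pvEmit g]) [p] (by simp)]
      simp [pvChunksAux, hh]
    · rw [pvStepA_neg_hdr _ _ (by simpa using hh), ih fin (g ++ [p]) (by simp)]
      simp [pvChunksAux, hh]

lemma pvChunksAux_eq (rest : List String) : ∀ (g : List String),
    pvChunksAux g rest =
      pvEmit (g ++ rest.takeWhile (fun q => !pvIsHeader q))
        :: pvChunks (rest.dropWhile (fun q => !pvIsHeader q)) := by
  induction rest with
  | nil => intro g; simp [pvChunksAux, pvChunks]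
  | cons p rest ih =>
    intro g
    by_cases hh : pvIsHeader p
    · simp only [pvChunksAux, hh, if_true]
      rw [ih [p]]
      simp [pvChunks, pvEmit, hh]
    · simp only [pvChunksAux, hh, Bool.false_eq_true, if_false]
      rw [ih (g ++ [p])]
      simp [pvEmit, hh]

-- ===== VERDICT (by name: the statement is the Claim_ definition above) =====
theorem split_explain_string_py_spec : Claim_equal_split_explain_string_py := by
  intro s _
  unfold Spec_split_explain_string_py split_explain_string_py split_explain_string_py_alt
  show pvFinishA (((PySem.Str.split? s "\n\n").getD []).foldl
      (fun acc p => pvStepA acc (PySem.Str.stripChars p "\n")) ([], [])) = _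
  rw [← List.foldl_map (f := fun p => PySem.Str.stripChars p "\n") (g := pvStepA)]
  generalize ((PySem.Str.split? s "\n\n").getD []).map (fun p => PySem.Str.stripChars p "\n") = ql
  cases ql with
  | nil => simp [pvFinishA, pvChunks]
  | cons q qs =>
    rw [List.foldl_cons, pvStepA_neg_empty _ _ (by rfl),
      show (([], []) : List String × List String).1 = [] from rfl,
      show (([], []) : List String × List String).2 ++ [q] = [q] from rfl,
      pvLoopA qs [] [q] (by simp), pvChunksAux_eq]
    simp [pvChunks, pvEmit]
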